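-- pv_equiv track=rewrite | github.com/banjotsaini/DataSci-200 | midterm.py | birthday_count
-- ===== SOURCE A (Python) =====
-- def birthday_count(dates_list):
--     """Returns the total number of birthday pairs in the dates_list"""
--     freq = {}
--     count = 0
--     for date in dates_list:
--         seen = freq.get(date, 0)
--         count += seen
--         freq[date] = seen + 1
--
--     return count
-- ===== SOURCE B (Python) =====
-- def birthday_count(dates_list):
--     """Returns the total number of birthday pairs in the dates_list"""
--     freq = {}
--     for date in dates_list:
--         freq[date] = freq.get(date, 0) + 1
--     total = 0
--     for c in freq.values():
--         total += c * (c - 1) // 2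
--     return total
-- ===== Notes on version B (the rewrite author's own statement) =====
-- stated objective: alternative
-- what changed: Replaces A's single-pass incremental pair accumulation (adding the seen-so-far count for each element) with two separate phases: build the full frequency table first, then sum the closed-form pairs-per-group c*(c-1)//2 over its values.
import Mathlib
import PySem

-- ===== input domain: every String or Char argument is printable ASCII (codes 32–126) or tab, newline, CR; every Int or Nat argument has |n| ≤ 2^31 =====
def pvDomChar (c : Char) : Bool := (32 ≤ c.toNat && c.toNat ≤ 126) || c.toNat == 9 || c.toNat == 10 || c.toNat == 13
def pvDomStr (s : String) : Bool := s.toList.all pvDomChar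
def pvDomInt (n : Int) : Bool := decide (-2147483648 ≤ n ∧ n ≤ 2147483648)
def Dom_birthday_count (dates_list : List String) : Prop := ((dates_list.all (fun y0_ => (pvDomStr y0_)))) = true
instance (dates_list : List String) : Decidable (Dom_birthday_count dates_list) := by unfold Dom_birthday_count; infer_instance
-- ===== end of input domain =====

-- B builds the full frequency table first, then sums the closed-form pairs-per-group c*(c-1)//2, instead of A's single-pass incremental pair accumulation.


-- ===== PORT A =====
def birthday_count (dates_list : List String) : Int :=
  (dates_list.foldl
    (fun (s : PySem.Dict String Int × Int) date =>
      let seen := s.1.getD date 0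
      (s.1.insert date (seen + 1), s.2 + seen))
    (PySem.Dict.empty, 0)).2

-- ===== PORT B =====
def birthday_count_alt (dates_list : List String) : Int :=
  let freq := dates_list.foldl
    (fun (d : PySem.Dict String Int) date => d.insert date (d.getD date 0 + 1))
    PySem.Dict.empty
  freq.values.foldl (fun total c => total + PySem.Int.floordiv (c * (c - 1)) 2) 0

-- ===== PRECONDITION & SPEC =====
def Spec_birthday_count (dates_list : List String) (out : Int) : Prop := out = birthday_count_alt dates_list
instance (dates_list : List String) (out : Int) : Decidable (Spec_birthday_count dates_list out) := by unfold Spec_birthday_count; infer_instance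

-- ===== CLAIM (what is proved, stated in full; the proofs are below) =====
def Claim_equal_birthday_count : Prop := ∀ (dates_list : List String), Dom_birthday_count dates_list → Spec_birthday_count dates_list (birthday_count dates_list)

-- ===== LEMMAS AND PROOFS =====

-- pairs-per-group term of B
def pvPairs (c : Int) : Int := PySem.Int.floordiv (c * (c - 1)) 2

lemma pvPairs_succ (c : Int) : pvPairs (c + 1) = pvPairs c + c := by
  unfold pvPairs
  rw [PySem.Int.floordiv_eq_ediv_of_pos (by norm_num),
      PySem.Int.floordiv_eq_ediv_of_pos (by norm_num)]
  have h : (c + 1) * (c + 1 - 1) = c * (c - 1) + c * 2 := by ring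
  rw [h, Int.add_mul_ediv_right _ _ (by norm_num)]

-- closed form of B: sum of pvPairs over distinct elements' counts
lemma alt_closed (l : List String) :
    birthday_count_alt l
      = ((PySem.Set.ofList l).map (fun k => pvPairs ((l.count k : Int)))).sum := by
  unfold birthday_count_alt
  rw [PySem.Dict.foldl_insert_getD_add_one_eq_counter]
  simp only [PySem.Dict.values]
  rw [PySem.Dict.items_counter]
  rw [PySem.List.foldl_add (g := fun c => PySem.Int.floordiv (c * (c - 1)) 2)]
  simp only [List.map_map, zero_add]
  rfl

-- the first component of A's fold is the insert-based counter fold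
lemma fst_fold (l : List String) (d : PySem.Dict String Int) (a : Int) :
    (l.foldl
      (fun (s : PySem.Dict String Int × Int) date =>
        let seen := s.1.getD date 0
        (s.1.insert date (seen + 1), s.2 + seen)) (d, a)).1
      = l.foldl (fun d date => d.insert date (d.getD date 0 + 1)) d := by
  induction l generalizing d a with
  | nil => rfl
  | cons x xs ih => simpa using ih _ _

-- replacing g by g' that differs only at one element x ∈ S (S nodup) shifts the sum by g' x - g x
lemma sum_map_update {α : Type} [DecidableEq α] (S : List α) (x : α) (g g' : α → Int)
    (hn : S.Nodup) (hx : x ∈ S) (h : ∀ k, k ≠ x → g' k = g k) :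
    (S.map g').sum = (S.map g).sum + (g' x - g x) := by
  induction S with
  | nil => cases hx
  | cons a S ih =>
    rcases List.mem_cons.mp hx with rfl | hxS
    · have hmap : S.map g' = S.map g := by
        apply List.map_congr_left
        intro k hk
        exact h k (fun hke => (List.nodup_cons.mp hn).1 (hke ▸ hk))
      simp [hmap]; ring
    · have ha : g' a = g a := h a (fun hax => (List.nodup_cons.mp hn).1 (hax ▸ hxS))
      have := ih (List.nodup_cons.mp hn).2 hxS
      simp [ha, this]; ring

lemma main_eq (l : List String) : birthday_count l = birthday_count_alt l := by
  induction l using List.reverseRecOn with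
  | nil => decide
  | append_singleton l x ih =>
    -- A side: one more step adds the current count of x
    have hA : birthday_count (l ++ [x]) = birthday_count l + (l.count x : Int) := by
      unfold birthday_count
      rw [List.foldl_append]
      simp only [List.foldl_cons, List.foldl_nil]
      rw [fst_fold]
      rw [PySem.Dict.foldl_insert_getD_add_one_eq_counter, PySem.Dict.getD_counter]
    -- B side
    have hcount_ne : ∀ k, k ≠ x → (l ++ [x]).count k = l.count k := by
      intro k hk; simp [List.count_append, Ne.symm hk]
    have hcount_x : (l ++ [x]).count x = l.count x + 1 := by
      simp [List.count_append]
    have hB : birthday_count_alt (l ++ [x]) = birthday_count_alt l + (l.count x : Int) := by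
      rw [alt_closed, alt_closed]
      have hofl : PySem.Set.ofList (l ++ [x]) = PySem.Set.add (PySem.Set.ofList l) x := by
        rw [PySem.Set.ofList_eq_foldl, PySem.Set.ofList_eq_foldl, List.foldl_append]
        rfl
      by_cases hmem : x ∈ l
      · have hadd : PySem.Set.add (PySem.Set.ofList l) x = PySem.Set.ofList l := by
          simp [PySem.Set.add, PySem.Set.contains, hmem]
        rw [hofl, hadd]
        have hxS : x ∈ PySem.Set.ofList l := (PySem.Set.mem_ofList l x).mpr hmem
        rw [sum_map_update (PySem.Set.ofList l) x
              (fun k => pvPairs ((l.count k : Int)))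
              (fun k => pvPairs (((l ++ [x]).count k : Int)))
              (PySem.Set.nodup_ofList l) hxS
              (by intro k hk; simp [hcount_ne k hk])]
        have : pvPairs (((l ++ [x]).count x : Int)) = pvPairs ((l.count x : Int)) + (l.count x : Int) := by
          rw [hcount_x]; push_cast; exact pvPairs_succ _
        rw [this]; ring
      · have hadd : PySem.Set.add (PySem.Set.ofList l) x = PySem.Set.ofList l ++ [x] := by
          simp [PySem.Set.add, PySem.Set.contains, PySem.Set.mem_ofList, hmem]
        rw [hofl, hadd]
        have hcl : l.count x = 0 := List.count_eq_zero_of_not_mem hmem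
        have hmap : (PySem.Set.ofList l).map (fun k => pvPairs (((l ++ [x]).count k : Int)))
            = (PySem.Set.ofList l).map (fun k => pvPairs ((l.count k : Int))) := by
          apply List.map_congr_left
          intro k hk
          have hkx : k ≠ x := fun he => hmem (he ▸ (PySem.Set.mem_ofList l k).mp hk)
          simp [hcount_ne k hkx]
        rw [List.map_append, List.sum_append, hmap]
        simp [hcl]
        decide
    rw [hA, hB, ih]

-- ===== VERDICT (by name: the statement is the Claim_ definition above) =====
theorem birthday_count_spec : Claim_equal_birthday_count := by
  intro l _
  unfold Spec_birthday_count
  exact main_eq l
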